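-- pv_equiv track=rewrite | github.com/wq2581/DrugClaw | drugclaw/query_plan.py | prioritize_target_lookup_skills
-- ===== SOURCE A (Python) =====
-- from typing import Any, Dict, List, Sequence
--
-- PRIMARY_TARGET_LOOKUP_SKILLS = (
--     "BindingDB",
--     "ChEMBL",
--     "DGIdb",
--     "Open Targets Platform",
-- )
--
-- SECONDARY_TARGET_LOOKUP_SKILLS = (
--     "DrugBank",
--     "TTD",
--     "STITCH",
--     "Molecular Targets",
--     "Molecular Targets Data",
--     "TarKG",
--     "DRUGMECHDB",
-- )
--
-- def prioritize_target_lookup_skills(skill_names: List[str]) -> List[str]: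
--     unique_names = list(dict.fromkeys(skill_names))
--     if not unique_names:
--         return []
--
--     primary = [name for name in PRIMARY_TARGET_LOOKUP_SKILLS if name in unique_names]
--     secondary = [name for name in SECONDARY_TARGET_LOOKUP_SKILLS if name in unique_names]
--     remainder = [
--         name
--         for name in unique_names
--         if name not in primary and name not in secondary
--     ]
--
--     if len(primary) >= 3:
--         return primary
--     if primary:
--         return primary + secondary + remainder
--     return secondary + remainder
-- ===== SOURCE B (Python) =====
-- PRIMARY_TARGET_LOOKUP_SKILLS = (
--     "BindingDB",
--     "ChEMBL",
--     "DGIdb",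
--     "Open Targets Platform",
-- )
--
-- SECONDARY_TARGET_LOOKUP_SKILLS = (
--     "DrugBank",
--     "TTD",
--     "STITCH",
--     "Molecular Targets",
--     "Molecular Targets Data",
--     "TarKG",
--     "DRUGMECHDB",
-- )
--
-- def prioritize_target_lookup_skills(skill_names):
--     unique = list(dict.fromkeys(skill_names))
--     n_primary = len(PRIMARY_TARGET_LOOKUP_SKILLS)
--     base = n_primary + len(SECONDARY_TARGET_LOOKUP_SKILLS)
--
--     def rank(name):
--         if name in PRIMARY_TARGET_LOOKUP_SKILLS:
--             return PRIMARY_TARGET_LOOKUP_SKILLS.index(name)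
--         if name in SECONDARY_TARGET_LOOKUP_SKILLS:
--             return n_primary + SECONDARY_TARGET_LOOKUP_SKILLS.index(name)
--         return base + unique.index(name)
--
--     ordered = sorted(unique, key=rank)
--     primary_count = sum(1 for name in unique if name in PRIMARY_TARGET_LOOKUP_SKILLS)
--     if primary_count >= 3:
--         return ordered[:primary_count]
--     return ordered
-- ===== Notes on version B (the rewrite author's own statement) =====
-- stated objective: alternative
-- what changed: Replaces the three separate tier-comprehension passes and branch chain by a single rank function (primary index / offset secondary index / offset input position) and one stable sort of the deduped names, truncating to the primary count when it is at least 3.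
import Mathlib
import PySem

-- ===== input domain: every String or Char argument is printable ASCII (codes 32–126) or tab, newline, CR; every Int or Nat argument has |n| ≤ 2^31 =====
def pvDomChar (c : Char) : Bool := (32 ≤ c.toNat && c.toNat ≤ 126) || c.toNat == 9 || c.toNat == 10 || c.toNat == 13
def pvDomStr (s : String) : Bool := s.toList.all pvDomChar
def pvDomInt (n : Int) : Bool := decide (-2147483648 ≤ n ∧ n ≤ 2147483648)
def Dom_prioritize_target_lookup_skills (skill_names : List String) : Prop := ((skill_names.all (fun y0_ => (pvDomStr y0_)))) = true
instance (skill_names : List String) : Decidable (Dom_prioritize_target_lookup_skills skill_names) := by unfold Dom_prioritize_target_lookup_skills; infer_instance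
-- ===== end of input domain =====

-- B replaces A's three tier-comprehension passes and branch chain by one rank function and
-- a single stable sort of the deduped names, truncated to the primary count when it is ≥ 3
-- (objective: alternative decomposition, similar cost).


-- ===== PORT A =====
-- module constant PRIMARY_TARGET_LOOKUP_SKILLS
def pvPrimarySkills : List String :=
  ["BindingDB", "ChEMBL", "DGIdb", "Open Targets Platform"]

-- module constant SECONDARY_TARGET_LOOKUP_SKILLS
def pvSecondarySkills : List String :=
  ["DrugBank", "TTD", "STITCH", "Molecular Targets", "Molecular Targets Data", "TarKG", "DRUGMECHDB"]

def prioritize_target_lookup_skills (skill_names : List String) : List String :=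
  let unique_names := PySem.List.dedup skill_names      -- list(dict.fromkeys(skill_names))
  if unique_names = [] then []
  else
    let primary := pvPrimarySkills.filter (fun name => unique_names.contains name)
    let secondary := pvSecondarySkills.filter (fun name => unique_names.contains name)
    let remainder := unique_names.filter
      (fun name => !primary.contains name && !secondary.contains name)
    if primary.length ≥ 3 then primary
    else if primary ≠ [] then primary ++ secondary ++ remainder
    else secondary ++ remainder

-- ===== PORT B =====
-- rank(name) from Source B (closure over `unique`); list.index via PySem.List.index?,
-- whose `none` case is unreachable since rank is only applied to members of the lists tested
def pvRank (unique : List String) (name : String) : Int :=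
  if pvPrimarySkills.contains name then
    (((PySem.List.index? pvPrimarySkills name).getD 0 : Nat) : Int)
  else if pvSecondarySkills.contains name then
    (pvPrimarySkills.length : Int) + (((PySem.List.index? pvSecondarySkills name).getD 0 : Nat) : Int)
  else
    ((pvPrimarySkills.length : Int) + (pvSecondarySkills.length : Int))
      + (((PySem.List.index? unique name).getD 0 : Nat) : Int)

def prioritize_target_lookup_skills_alt (skill_names : List String) : List String :=
  let unique := PySem.List.dedup skill_names            -- list(dict.fromkeys(skill_names))
  let ordered := PySem.List.sorted unique (pvRank unique)   -- sorted(unique, key=rank)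
  let primary_count : Int :=
    unique.foldl (fun acc name => if pvPrimarySkills.contains name then acc + 1 else acc) 0
  if primary_count ≥ 3 then PySem.List.slice ordered none (some primary_count)  -- ordered[:primary_count]
  else ordered

-- ===== PRECONDITION & SPEC =====
def Spec_prioritize_target_lookup_skills (skill_names : List String) (out : List String) : Prop := out = prioritize_target_lookup_skills_alt skill_names
instance (skill_names : List String) (out : List String) : Decidable (Spec_prioritize_target_lookup_skills skill_names out) := by unfold Spec_prioritize_target_lookup_skills; infer_instance

-- ===== CLAIM (what is proved, stated in full; the proofs are below) =====
def Claim_equal_prioritize_target_lookup_skills : Prop := ∀ (skill_names : List String), Dom_prioritize_target_lookup_skills skill_names → Spec_prioritize_target_lookup_skills skill_names (prioritize_target_lookup_skills skill_names)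

-- ===== LEMMAS AND PROOFS =====

-- proof-side names for A's three tiers (definitionally the filter expressions in the ports)
def pvTierP (u : List String) : List String := pvPrimarySkills.filter (fun name => u.contains name)
def pvTierS (u : List String) : List String := pvSecondarySkills.filter (fun name => u.contains name)
def pvTierR (u : List String) : List String :=
  u.filter (fun name => !(pvTierP u).contains name && !(pvTierS u).contains name)

theorem mem_pvTierP (u : List String) (n : String) : n ∈ pvTierP u ↔ n ∈ pvPrimarySkills ∧ n ∈ u := by
  simp [pvTierP, List.mem_filter]

theorem mem_pvTierS (u : List String) (n : String) : n ∈ pvTierS u ↔ n ∈ pvSecondarySkills ∧ n ∈ u := by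
  simp [pvTierS, List.mem_filter]

theorem mem_pvTierR (u : List String) (n : String) :
    n ∈ pvTierR u ↔ n ∈ u ∧ n ∉ pvPrimarySkills ∧ n ∉ pvSecondarySkills := by
  simp [pvTierR, List.mem_filter, mem_pvTierP, mem_pvTierS]
  tauto

theorem prim_sec_disjoint : ∀ n ∈ pvPrimarySkills, n ∉ pvSecondarySkills := by decide

theorem idxOf?_eq_some_of_mem (l : List String) (v : String) (h : v ∈ l) :
    List.idxOf? v l = some (l.idxOf v) := by
  induction l with
  | nil => simp at h
  | cons a t ih =>
    by_cases hv : a = v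
    · subst hv; simp [List.idxOf?_cons]
    · have hm : v ∈ t := by simpa [Ne.symm hv] using h
      simp [List.idxOf?_cons, List.idxOf_cons, hv, ih hm]

theorem pairwise_idxOf_lt (l : List String) (h : l.Nodup) :
    l.Pairwise (fun a b => l.idxOf a < l.idxOf b) := by
  induction l with
  | nil => exact List.Pairwise.nil
  | cons a t ih =>
    rw [List.nodup_cons] at h
    refine List.Pairwise.cons ?_ ?_
    · intro b hb
      have hba : b ≠ a := fun e => h.1 (e ▸ hb)
      simp [List.idxOf_cons, hba.symm]
    · refine (ih h.2).imp_of_mem ?_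
      intro b c hb hc hlt
      have hba : b ≠ a := fun e => h.1 (e ▸ hb)
      have hca : c ≠ a := fun e => h.1 (e ▸ hc)
      simp [List.idxOf_cons, hba.symm, hca.symm]
      omega

theorem pvRank_of_prim (u : List String) (n : String) (h : n ∈ pvPrimarySkills) :
    pvRank u n = (pvPrimarySkills.idxOf n : Int) := by
  simp [pvRank, h, PySem.List.index?_eq_idxOf?, idxOf?_eq_some_of_mem _ _ h]

theorem pvRank_of_sec (u : List String) (n : String) (h1 : n ∉ pvPrimarySkills)
    (h2 : n ∈ pvSecondarySkills) :
    pvRank u n = 4 + (pvSecondarySkills.idxOf n : Int) := by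
  have c1 : pvPrimarySkills.contains n = false := by simpa using h1
  have c2 : pvSecondarySkills.contains n = true := by simpa using h2
  simp only [pvRank, c1, c2, Bool.false_eq_true, if_false, if_true,
    PySem.List.index?_eq_idxOf?, idxOf?_eq_some_of_mem _ _ h2, Option.getD_some]
  norm_num [pvPrimarySkills]

theorem pvRank_of_other (u : List String) (n : String) (h1 : n ∉ pvPrimarySkills)
    (h2 : n ∉ pvSecondarySkills) (h3 : n ∈ u) :
    pvRank u n = 11 + (u.idxOf n : Int) := by
  have c1 : pvPrimarySkills.contains n = false := by simpa using h1
  have c2 : pvSecondarySkills.contains n = false := by simpa using h2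
  simp only [pvRank, c1, c2, Bool.false_eq_true, if_false,
    PySem.List.index?_eq_idxOf?, idxOf?_eq_some_of_mem _ _ h3, Option.getD_some]
  norm_num [pvPrimarySkills, pvSecondarySkills]

theorem pvTier_perm (u : List String) (hu : u.Nodup) :
    (pvTierP u ++ pvTierS u ++ pvTierR u).Perm u := by
  have hP : (pvTierP u).Nodup := (by decide : pvPrimarySkills.Nodup).filter _
  have hS : (pvTierS u).Nodup := (by decide : pvSecondarySkills.Nodup).filter _
  have hR : (pvTierR u).Nodup := hu.filter _
  have hnd : (pvTierP u ++ pvTierS u ++ pvTierR u).Nodup := by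
    rw [List.append_assoc, List.nodup_append, List.nodup_append]
    refine ⟨hP, ⟨hS, hR, ?_⟩, ?_⟩
    · intro a haS b haR heq
      subst heq
      exact ((mem_pvTierR u a).mp haR).2.2 ((mem_pvTierS u a).mp haS).1
    · intro a haP b hmem heq
      subst heq
      rcases List.mem_append.mp hmem with haS | haR
      · exact prim_sec_disjoint a ((mem_pvTierP u a).mp haP).1 ((mem_pvTierS u a).mp haS).1
      · exact ((mem_pvTierR u a).mp haR).2.1 ((mem_pvTierP u a).mp haP).1
  refine (List.perm_ext_iff_of_nodup hnd hu).mpr ?_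
  intro a
  constructor
  · intro h
    rcases List.mem_append.mp h with h | haR
    · rcases List.mem_append.mp h with haP | haS
      · exact ((mem_pvTierP u a).mp haP).2
      · exact ((mem_pvTierS u a).mp haS).2
    · exact ((mem_pvTierR u a).mp haR).1
  · intro h
    by_cases hp : a ∈ pvPrimarySkills
    · exact List.mem_append.mpr (.inl (List.mem_append.mpr (.inl ((mem_pvTierP u a).mpr ⟨hp, h⟩))))
    · by_cases hs : a ∈ pvSecondarySkills
      · exact List.mem_append.mpr (.inl (List.mem_append.mpr (.inr ((mem_pvTierS u a).mpr ⟨hs, h⟩))))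
      · exact List.mem_append.mpr (.inr ((mem_pvTierR u a).mpr ⟨h, hp, hs⟩))

theorem pvTier_pairwise (u : List String) (hu : u.Nodup) :
    (pvTierP u ++ pvTierS u ++ pvTierR u).Pairwise (fun a b => pvRank u a < pvRank u b) := by
  have hprimLen : ∀ n ∈ pvPrimarySkills, pvPrimarySkills.idxOf n < 4 := by
    intro n h; exact List.idxOf_lt_length_of_mem h
  have hsecLen : ∀ n ∈ pvSecondarySkills, pvSecondarySkills.idxOf n < 7 := by
    intro n h; exact List.idxOf_lt_length_of_mem h
  -- rank ranges of the three tiers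
  have hPlt : ∀ n ∈ pvTierP u, pvRank u n < 4 := by
    intro n h
    have hp := ((mem_pvTierP u n).mp h).1
    rw [pvRank_of_prim u n hp]
    have := hprimLen n hp; omega
  have hSrange : ∀ n ∈ pvTierS u, 4 ≤ pvRank u n ∧ pvRank u n < 11 := by
    intro n h
    have hs := ((mem_pvTierS u n).mp h).1
    have hnp : n ∉ pvPrimarySkills := fun hp => prim_sec_disjoint n hp hs
    rw [pvRank_of_sec u n hnp hs]
    have := hsecLen n hs; omega
  have hRge : ∀ n ∈ pvTierR u, 11 ≤ pvRank u n := by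
    intro n h
    obtain ⟨hmem, hnp, hns⟩ := (mem_pvTierR u n).mp h
    rw [pvRank_of_other u n hnp hns hmem]; omega
  rw [List.append_assoc, List.pairwise_append]
  refine ⟨?_, ?_, ?_⟩
  · -- within the primary tier: strictly increasing index in pvPrimarySkills
    refine ((pairwise_idxOf_lt pvPrimarySkills (by decide)).filter _).imp_of_mem ?_
    intro a b ha hb hlt
    rw [pvRank_of_prim u a ((mem_pvTierP u a).mp ha).1,
        pvRank_of_prim u b ((mem_pvTierP u b).mp hb).1]
    exact_mod_cast hlt
  · rw [List.pairwise_append]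
    refine ⟨?_, ?_, ?_⟩
    · -- within the secondary tier
      refine ((pairwise_idxOf_lt pvSecondarySkills (by decide)).filter _).imp_of_mem ?_
      intro a b ha hb hlt
      have hsa := ((mem_pvTierS u a).mp ha).1
      have hsb := ((mem_pvTierS u b).mp hb).1
      rw [pvRank_of_sec u a (fun hp => prim_sec_disjoint a hp hsa) hsa,
          pvRank_of_sec u b (fun hp => prim_sec_disjoint b hp hsb) hsb]
      omega
    · -- within the remainder: strictly increasing index in u
      refine ((pairwise_idxOf_lt u hu).filter _).imp_of_mem ?_
      intro a b ha hb hlt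
      obtain ⟨hma, hpa, hsa⟩ := (mem_pvTierR u a).mp ha
      obtain ⟨hmb, hpb, hsb⟩ := (mem_pvTierR u b).mp hb
      rw [pvRank_of_other u a hpa hsa hma, pvRank_of_other u b hpb hsb hmb]
      omega
    · -- secondary tier before remainder
      intro a ha b hb
      have := (hSrange a ha).2
      have := hRge b hb
      omega
  · -- primary tier before the rest
    intro a ha b hb
    have := hPlt a ha
    rcases List.mem_append.mp hb with hb | hb
    · have := (hSrange b hb).1; omega
    · have := hRge b hb; omega

theorem pvSorted_eq (u : List String) (hu : u.Nodup) :
    PySem.List.sorted u (pvRank u) = pvTierP u ++ pvTierS u ++ pvTierR u :=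
  PySem.List.sorted_eq_of_perm_of_pairwise_lt _ _ _ (pvTier_perm u hu) (pvTier_pairwise u hu)

theorem pvCount_eq (u : List String) (hu : u.Nodup) :
    u.countP (fun name => pvPrimarySkills.contains name) = (pvTierP u).length := by
  rw [List.countP_eq_length_filter]
  refine List.Perm.length_eq ?_
  refine (List.perm_ext_iff_of_nodup (hu.filter _) ((by decide : pvPrimarySkills.Nodup).filter _)).mpr ?_
  intro a
  simp [List.mem_filter, pvTierP]
  tauto

theorem fold_tierP (u : List String) :
    List.filter (fun name => u.contains name) pvPrimarySkills = pvTierP u := rfl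

theorem fold_tierS (u : List String) :
    List.filter (fun name => u.contains name) pvSecondarySkills = pvTierS u := rfl

theorem fold_tierR (u : List String) :
    List.filter (fun name => !(pvTierP u).contains name && !(pvTierS u).contains name) u
      = pvTierR u := rfl

-- ===== VERDICT (by name: the statement is the Claim_ definition above) =====
theorem prioritize_target_lookup_skills_spec : Claim_equal_prioritize_target_lookup_skills := by
  intro skill_names _
  unfold Spec_prioritize_target_lookup_skills
  unfold prioritize_target_lookup_skills prioritize_target_lookup_skills_alt
  have hu : (PySem.List.dedup skill_names).Nodup := PySem.List.nodup_dedup skill_names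
  set u := PySem.List.dedup skill_names with hu_def
  simp only [fold_tierP, fold_tierS, fold_tierR, PySem.List.foldl_if_add_one]
  rw [pvSorted_eq u hu, pvCount_eq u hu]
  by_cases hnil : u = []
  · rw [hnil]
    simp [pvTierP, pvTierS, pvTierR]
  · rw [if_neg hnil]
    by_cases h3 : (pvTierP u).length ≥ 3
    · rw [if_pos h3, if_pos (show (0 : Int) + ((pvTierP u).length : Int) ≥ 3 by omega)]
      rw [PySem.List.slice_to _ (by omega)]
      rw [show ((0 : Int) + ((pvTierP u).length : Int)).toNat = (pvTierP u).length by omega]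
      rw [List.append_assoc, List.take_left]
    · rw [if_neg h3, if_neg (show ¬ ((0 : Int) + ((pvTierP u).length : Int) ≥ 3) by omega)]
      by_cases hne : pvTierP u ≠ []
      · rw [if_pos hne]
      · rw [if_neg hne]
        push_neg at hne
        rw [hne, List.nil_append]
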